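-- pv_equiv track=rewrite | github.com/linhdvu14/cp-sols | sols/CodeForces/1670_d2/D_Very_Suspicious.py | solve
-- ===== SOURCE A (Python) =====
-- def solve(N):
--     def is_ok(x):
--         a = b = c = x // 3
--         if x % 3 >= 1: a += 1
--         if x % 3 >= 2: b += 1
--         return 2 * (a * b + b * c + c * a) >= N
--
--     res, lo, hi = 0, 0, N * 3
--     while lo <= hi:
--         mi = (lo + hi) // 2
--         if is_ok(mi):
--             res = mi
--             hi = mi - 1
--         else:
--             lo = mi + 1
--
--     return res
-- ===== SOURCE B (Python) =====
-- def solve(N):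
--     x = 0
--     while True:
--         a = b = c = x // 3
--         if x % 3 >= 1: a += 1
--         if x % 3 >= 2: b += 1
--         if 2 * (a * b + b * c + c * a) >= N:
--             return x
--         x += 1
-- ===== Notes on version B (the rewrite author's own statement) =====
-- stated objective: simpler
-- what changed: Replaces the binary search over [0, 3N] (with its inner is_ok closure and res/lo/hi bookkeeping) by a plain linear scan that returns the first x whose intersection count reaches N; monotonicity of the count makes the first hit the minimum.
import Mathlib
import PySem

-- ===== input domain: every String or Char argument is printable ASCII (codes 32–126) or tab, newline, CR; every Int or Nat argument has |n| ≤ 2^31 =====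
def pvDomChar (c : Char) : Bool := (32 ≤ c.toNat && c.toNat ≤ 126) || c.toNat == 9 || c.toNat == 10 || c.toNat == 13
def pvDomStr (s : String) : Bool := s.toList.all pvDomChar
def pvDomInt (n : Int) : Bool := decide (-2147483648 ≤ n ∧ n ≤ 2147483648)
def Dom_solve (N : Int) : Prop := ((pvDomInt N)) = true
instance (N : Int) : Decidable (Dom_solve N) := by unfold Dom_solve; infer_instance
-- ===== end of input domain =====

-- B replaces A's binary search by a linear scan for the first feasible x (simpler; the count is monotone).

-- ===== PORT A =====
-- the inner closure is_ok of A
def isOkA (N x : Int) : Bool :=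
  let c := PySem.Int.floordiv x 3
  let a := if PySem.Int.mod x 3 ≥ 1 then c + 1 else c
  let b := if PySem.Int.mod x 3 ≥ 2 then c + 1 else c
  decide (2 * (a * b + b * c + c * a) ≥ N)

-- the 'while lo <= hi' binary-search loop of A
def bsearchA (N lo hi res : Int) : Int :=
  if h : lo ≤ hi then
    let mi := PySem.Int.floordiv (lo + hi) 2
    if isOkA N mi then bsearchA N lo (mi - 1) mi
    else bsearchA N (mi + 1) hi res
  else res
termination_by (hi + 1 - lo).toNat
decreasing_by
  · have := PySem.Int.floordiv_two_mid_bounds h; omega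
  · have := PySem.Int.floordiv_two_mid_bounds h; omega

def solve (N : Int) : Int := bsearchA N 0 (N * 3) 0

-- ===== PORT B =====
-- B's feasibility test (same arithmetic, inline in B's loop body)
def isOkB (N x : Int) : Bool :=
  let c := PySem.Int.floordiv x 3
  let a := if PySem.Int.mod x 3 ≥ 1 then c + 1 else c
  let b := if PySem.Int.mod x 3 ≥ 2 then c + 1 else c
  decide (2 * (a * b + b * c + c * a) ≥ N)

-- B's 'while True' scan; the fuel only makes the loop total (it is never exhausted:
-- a feasible x exists at max 0 (3*N), proved below)
def scanB (N : Int) : Nat → Int → Int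
  | 0, x => x
  | f + 1, x => if isOkB N x then x else scanB N f (x + 1)

def solve_alt (N : Int) : Int := scanB N ((3 * N).toNat + 1) 0

-- ===== PRECONDITION & SPEC =====
def Spec_solve (N : Int) (out : Int) : Prop := out = solve_alt N
instance (N : Int) (out : Int) : Decidable (Spec_solve N out) := by unfold Spec_solve; infer_instance

-- ===== CLAIM (what is proved, stated in full; the proofs are below) =====
def Claim_equal_solve : Prop := ∀ (N : Int), Dom_solve N → Spec_solve N (solve N)

-- ===== LEMMAS AND PROOFS =====

-- "r is the least nonnegative feasible point"
def IsLeast' (N r : Int) : Prop :=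
  0 ≤ r ∧ isOkA N r = true ∧ ∀ y, 0 ≤ y → y < r → isOkA N y = false

theorem isOkB_eq_isOkA (N x : Int) : isOkB N x = isOkA N x := rfl

theorem isOkA_step (N x : Int) (hx : 0 ≤ x) (h : isOkA N x = true) :
    isOkA N (x + 1) = true := by
  unfold isOkA at *
  have h3 : (0:Int) < 3 := by norm_num
  rw [PySem.Int.floordiv_eq_ediv_of_pos h3, PySem.Int.mod_eq_emod_of_pos h3] at *
  simp only [decide_eq_true_eq] at h ⊢
  have hq : 0 ≤ x / 3 := Int.ediv_nonneg hx (by norm_num)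
  have hr01 : x % 3 = 0 ∨ x % 3 = 1 ∨ x % 3 = 2 := by omega
  rcases hr01 with hr | hr | hr
  · have e1 : (x + 1) / 3 = x / 3 := by omega
    have e2 : (x + 1) % 3 = 1 := by omega
    rw [hr] at h; rw [e1, e2]
    norm_num at h ⊢
    nlinarith
  · have e1 : (x + 1) / 3 = x / 3 := by omega
    have e2 : (x + 1) % 3 = 2 := by omega
    rw [hr] at h; rw [e1, e2]
    norm_num at h ⊢
    nlinarith
  · have e1 : (x + 1) / 3 = x / 3 + 1 := by omega
    have e2 : (x + 1) % 3 = 0 := by omega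
    rw [hr] at h; rw [e1, e2]
    norm_num at h ⊢
    nlinarith

theorem isOkA_mono (N x y : Int) (hx : 0 ≤ x) (hxy : x ≤ y)
    (h : isOkA N x = true) : isOkA N y = true := by
  have : ∀ n : Nat, isOkA N (x + n) = true := by
    intro n
    induction n with
    | zero => simpa using h
    | succ k ih =>
        have := isOkA_step N (x + k) (by positivity) ih
        have e : x + (k + 1 : Nat) = (x + k) + 1 := by push_cast; ring
        rw [e]; exact this
  have hn : y = x + ((y - x).toNat : Int) := by omega
  rw [hn]; exact this _

theorem isOkA_exists (N : Int) : isOkA N (max 0 (3 * N)) = true := by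
  by_cases hN : N ≤ 0
  · have e : max 0 (3 * N) = 0 := by omega
    rw [e]; unfold isOkA; simp [PySem.Int.floordiv, PySem.Int.mod]; omega
  · have e : max 0 (3 * N) = 3 * N := by omega
    rw [e]; unfold isOkA
    have h3 : (0:Int) < 3 := by norm_num
    rw [PySem.Int.floordiv_eq_ediv_of_pos h3, PySem.Int.mod_eq_emod_of_pos h3]
    have e1 : 3 * N / 3 = N := by omega
    have e2 : 3 * N % 3 = 0 := by omega
    rw [e1, e2]
    simp only [decide_eq_true_eq]
    norm_num
    nlinarith

theorem least_unique (N r r' : Int) (h : IsLeast' N r) (h' : IsLeast' N r') : r = r' := by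
  obtain ⟨hr0, hrok, hrmin⟩ := h
  obtain ⟨hr0', hrok', hrmin'⟩ := h'
  rcases lt_trichotomy r r' with hlt | heq | hgt
  · have := hrmin' r hr0 hlt; rw [hrok] at this; cases this
  · exact heq
  · have := hrmin r' hr0' hgt; rw [hrok'] at this; cases this

-- B's scan returns the least feasible point, given one exists within the fuel
theorem scanB_least (N : Int) : ∀ (f : Nat) (x : Int), 0 ≤ x →
    (∀ y, 0 ≤ y → y < x → isOkA N y = false) →
    (∃ t, x ≤ t ∧ t < x + (f : Int) ∧ isOkA N t = true) →
    IsLeast' N (scanB N f x) := by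
  intro f
  induction f with
  | zero => intro x _ _ ht; obtain ⟨t, h1, h2, _⟩ := ht; simp at h2; omega
  | succ k ih =>
      intro x hx hbelow ht
      unfold scanB
      rw [isOkB_eq_isOkA]
      cases hok : isOkA N x with
      | true =>
        simp only [if_true]
        exact ⟨hx, hok, hbelow⟩
      | false =>
        simp only [Bool.false_eq_true, if_false]
        apply ih (x + 1) (by omega)
        · intro y hy0 hy
          rcases lt_or_ge y x with h | h
          · exact hbelow y hy0 h
          · have : y = x := by omega
            rw [this]; exact hok
        · obtain ⟨t, h1, h2, h3⟩ := ht
          refine ⟨t, ?_, by push_cast at *; omega, h3⟩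
          rcases lt_or_ge x t with h | h
          · omega
          · have : t = x := by omega
            rw [this] at h3; rw [h3] at hok; cases hok

-- A's binary search, after the first success: res stays feasible, hi = res - 1
theorem bsearchA_found (N : Int) : ∀ (fuel : Nat) (lo hi res : Int),
    (hi + 1 - lo).toNat ≤ fuel →
    0 ≤ lo → lo ≤ res → res = hi + 1 → isOkA N res = true →
    (∀ y, 0 ≤ y → y < lo → isOkA N y = false) →
    IsLeast' N (bsearchA N lo hi res) := by
  intro fuel
  induction fuel with
  | zero =>
      intro lo hi res hf h0 h1 h2 h3 h4
      have hgt : ¬ lo ≤ hi := by omega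
      rw [bsearchA, dif_neg hgt]
      refine ⟨by omega, h3, ?_⟩
      intro y hy0 hy; exact h4 y hy0 (by omega)
  | succ k ih =>
      intro lo hi res hf h0 h1 h2 h3 h4
      rw [bsearchA]
      by_cases hle : lo ≤ hi
      · rw [dif_pos hle]
        have hmid := PySem.Int.floordiv_two_mid_bounds hle
        set mi := PySem.Int.floordiv (lo + hi) 2 with hmi
        cases hok : isOkA N mi with
        | true =>
          simp only [hok, if_true]
          exact ih lo (mi - 1) mi (by omega) h0 (by omega) (by omega) hok h4
        | false =>
          simp only [hok, Bool.false_eq_true, if_false]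
          apply ih (mi + 1) hi res (by omega) (by omega) (by omega) h2 h3
          intro y hy0 hy
          rcases lt_or_ge y lo with h | h
          · exact h4 y hy0 h
          · have := isOkA_mono N y mi hy0 (by omega)
            cases hyv : isOkA N y with
            | false => rfl
            | true => rw [this hyv] at hok; cases hok
      · rw [dif_neg hle]
        refine ⟨by omega, h3, ?_⟩
        intro y hy0 hy; exact h4 y hy0 (by omega)

-- A's binary search before any success (res = 0, invariant carries a feasible point in [lo, hi])
theorem bsearchA_notfound (N : Int) : ∀ (fuel : Nat) (lo hi : Int),
    (hi + 1 - lo).toNat ≤ fuel →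
    0 ≤ lo →
    (∀ y, 0 ≤ y → y < lo → isOkA N y = false) →
    (∃ t, lo ≤ t ∧ t ≤ hi ∧ isOkA N t = true) →
    IsLeast' N (bsearchA N lo hi 0) := by
  intro fuel
  induction fuel with
  | zero =>
      intro lo hi hf h0 h4 ht
      obtain ⟨t, h1, h2, _⟩ := ht; omega
  | succ k ih =>
      intro lo hi hf h0 h4 ht
      obtain ⟨t, ht1, ht2, ht3⟩ := ht
      have hle : lo ≤ hi := by omega
      rw [bsearchA, dif_pos hle]
      have hmid := PySem.Int.floordiv_two_mid_bounds hle
      set mi := PySem.Int.floordiv (lo + hi) 2 with hmi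
      cases hok : isOkA N mi with
      | true =>
        simp only [hok, if_true]
        exact bsearchA_found N k lo (mi - 1) mi (by omega) h0 (by omega) (by omega) hok h4
      | false =>
        simp only [hok, Bool.false_eq_true, if_false]
        apply ih (mi + 1) hi (by omega) (by omega)
        · intro y hy0 hy
          rcases lt_or_ge y lo with h | h
          · exact h4 y hy0 h
          · have := isOkA_mono N y mi hy0 (by omega)
            cases hyv : isOkA N y with
            | false => rfl
            | true => rw [this hyv] at hok; cases hok
        · refine ⟨t, ?_, ht2, ht3⟩
          by_contra hc
          rw [isOkA_mono N t mi (by omega) (by omega) ht3] at hok; cases hok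

theorem solve_least (N : Int) : IsLeast' N (solve N) := by
  unfold solve
  rcases lt_or_ge N 0 with hN | hN
  · have hgt : ¬ (0:Int) ≤ N * 3 := by nlinarith
    rw [bsearchA, dif_neg hgt]
    refine ⟨le_refl 0, ?_, by intro y h1 h2; omega⟩
    have := isOkA_exists N
    have e : max 0 (3 * N) = 0 := by omega
    rwa [e] at this
  · apply bsearchA_notfound N (N * 3 + 1).toNat 0 (N * 3) (by omega) (le_refl 0)
    · intro y h1 h2; omega
    · refine ⟨3 * N, by omega, by omega, ?_⟩
      have := isOkA_exists N
      have e : max 0 (3 * N) = 3 * N := by omega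
      rwa [e] at this

theorem solve_alt_least (N : Int) : IsLeast' N (solve_alt N) := by
  unfold solve_alt
  apply scanB_least N ((3 * N).toNat + 1) 0 (le_refl 0)
  · intro y h1 h2; omega
  · refine ⟨max 0 (3 * N), by omega, by push_cast; omega, isOkA_exists N⟩

-- ===== VERDICT (by name: the statement is the Claim_ definition above) =====
theorem solve_spec : Claim_equal_solve := by
  intro N _
  unfold Spec_solve
  exact least_unique N (solve N) (solve_alt N) (solve_least N) (solve_alt_least N)
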